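-- pv_equiv track=rewrite | github.com/boknowswiki/mytraning | lintcode/python/1890_form_minimum_number.py | formMinimumNumber
-- ===== SOURCE A (Python) =====
-- def formMinimumNumber(str):
--     # Write your code here.
--     n = len(str)
--     ret = ["0"]*(n+1)
--     cnt = 1
--
--     for i in range(n+1):
--         if i == n or str[i] == 'I':
--             for j in range(i-1, -2, -1):
--                 ret[j+1] = chr(ord("0")+cnt)
--                 cnt += 1
--                 if j >= 0 and str[j] == 'I':
--                     break
--     return ''.join(ret)
-- ===== SOURCE B (Python) =====
-- def formMinimumNumber(str):
--     # Forward push / LIFO-flush: push i+1 on a stack; at 'I' (or the end) pop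
--     # the whole stack into the result, yielding each segment's digits at once.
--     n = len(str)
--     stack = []
--     res = []
--     for i in range(n + 1):
--         stack.append(i + 1)
--         if i == n or str[i] == 'I':
--             while stack:
--                 res.append(chr(ord('0') + stack.pop()))
--     return ''.join(res)
-- ===== Notes on version B (the rewrite author's own statement) =====
-- stated objective: idiomatic
-- what changed: Replaces A's preallocated array with nested backward per-segment fill and a global counter by a single forward pass that pushes i+1 onto a stack and flushes the stack LIFO into the result at each increase marker and at the end.
import Mathlib
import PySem

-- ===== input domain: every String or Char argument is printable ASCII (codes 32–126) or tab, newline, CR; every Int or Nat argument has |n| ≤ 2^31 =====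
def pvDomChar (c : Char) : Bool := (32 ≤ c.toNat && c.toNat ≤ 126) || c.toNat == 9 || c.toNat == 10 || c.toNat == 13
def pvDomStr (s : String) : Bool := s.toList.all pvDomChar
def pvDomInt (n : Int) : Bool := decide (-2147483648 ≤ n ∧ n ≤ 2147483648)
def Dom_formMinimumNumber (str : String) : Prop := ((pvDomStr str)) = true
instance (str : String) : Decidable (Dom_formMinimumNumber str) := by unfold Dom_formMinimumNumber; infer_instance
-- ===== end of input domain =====

-- B replaces A's backward per-segment array fill with a global counter by a forward push / LIFO stack flush (same asymptotic cost, more idiomatic).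

-- chr(ord("0") + c), used verbatim by both Pythons
def chr48 (c : Int) : Char := Char.ofNat (48 + c).toNat

-- ===== PORT A =====
-- inner loop `for j in range(i-1, -2, -1)` of A, with m = j + 1 (m runs i, i-1, … down to the break, or through m = 0)
def innerA (sL : List Char) : List Char → Int → Nat → List Char × Int
  | ret, cnt, 0 => (ret.set 0 (chr48 cnt), cnt + 1)
  | ret, cnt, m' + 1 =>
      let ret' := ret.set (m' + 1) (chr48 cnt)
      let cnt' := cnt + 1
      if sL.getD m' ' ' = 'I' then (ret', cnt') else innerA sL ret' cnt' m'

-- outer loop `for i in range(n+1)`: `outerA sL n k st` has processed i = 0 .. k-1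
def outerA (sL : List Char) (n : Nat) : Nat → List Char × Int → List Char × Int
  | 0, st => st
  | k + 1, st =>
      let (ret, cnt) := outerA sL n k st
      if k = n ∨ sL.getD k ' ' = 'I' then innerA sL ret cnt k else (ret, cnt)

def formMinimumNumber (str : String) : String :=
  let sL := str.toList
  let n := sL.length
  String.ofList (outerA sL n (n + 1) (List.replicate (n + 1) '0', 1)).1

-- ===== PORT B =====
-- `while stack: res.append(chr(ord('0') + stack.pop()))`; the stack is kept top-first
def popAll (st : List Int) (res : List Char) : List Char :=
  match st with
  | [] => res
  | v :: rest => popAll rest (res ++ [chr48 v])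

-- `for i in range(n+1)`: `outerB sL n k st` has processed i = 0 .. k-1; state = (res, stack)
def outerB (sL : List Char) (n : Nat) : Nat → List Char × List Int → List Char × List Int
  | 0, st => st
  | k + 1, st =>
      let (res, stk) := outerB sL n k st
      let stk' := ((k : Int) + 1) :: stk
      if k = n ∨ sL.getD k ' ' = 'I' then (popAll stk' res, []) else (res, stk')

def formMinimumNumber_alt (str : String) : String :=
  let sL := str.toList
  let n := sL.length
  String.ofList (outerB sL n (n + 1) ([], [])).1

-- ===== PRECONDITION & SPEC =====
def Spec_formMinimumNumber (str : String) (out : String) : Prop := out = formMinimumNumber_alt str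
instance (str : String) (out : String) : Decidable (Spec_formMinimumNumber str out) := by unfold Spec_formMinimumNumber; infer_instance

-- ===== CLAIM (what is proved, stated in full; the proofs are below) =====
def Claim_equal_formMinimumNumber : Prop := ∀ (str : String), Dom_formMinimumNumber str → Spec_formMinimumNumber str (formMinimumNumber str)

-- ===== LEMMAS AND PROOFS =====

-- the digit segment a flush over `len` positions writes, read left to right:
-- position t (0-based inside the segment) receives counter value cnt + len - 1 - t
def seg (cnt : Int) (len : Nat) : List Char :=
  (List.range len).map (fun (t : Nat) => chr48 (cnt + (len : Int) - 1 - (t : Int)))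

theorem length_seg (cnt : Int) (len : Nat) : (seg cnt len).length = len := by
  simp [seg]

theorem seg_zero (cnt : Int) : seg cnt 0 = [] := by simp [seg]

theorem seg_succ (cnt : Int) (d : Nat) :
    seg cnt (d + 1) = seg (cnt + 1) d ++ [chr48 cnt] := by
  unfold seg
  rw [List.range_succ, List.map_append]
  congr 1
  · apply List.map_congr_left
    intro t _
    congr 1
    push_cast
    omega
  · simp only [List.map_cons, List.map_nil, List.cons.injEq]
    refine ⟨?_, trivial⟩
    congr 1
    push_cast
    omega

theorem popAll_eq (st : List Int) (res : List Char) : popAll st res = res ++ st.map chr48 := by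
  induction st generalizing res with
  | nil => simp [popAll]
  | cons v rest ih => simp [popAll, ih]

theorem innerA_spec (sL : List Char) (res : List Char) :
    ∀ (d : Nat) (done : List Char) (cnt : Int),
      (∀ j, res.length ≤ j → j < res.length + d → sL.getD j ' ' ≠ 'I') →
      (res.length = 0 ∨ sL.getD (res.length - 1) ' ' = 'I') →
      innerA sL (res ++ (List.replicate (d + 1) '0' ++ done)) cnt (res.length + d)
        = (res ++ (seg cnt (d + 1) ++ done), cnt + (d : Int) + 1) := by
  intro d
  induction d with
  | zero =>
    intro done cnt _ h0
    have hset : (res ++ ('0' :: done)).set res.length (chr48 cnt)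
        = res ++ (chr48 cnt :: done) := by
      rw [List.set_append_right _ _ (Nat.le_refl _)]
      simp
    have hseg1 : seg cnt 1 = [chr48 cnt] := by
      rw [seg_succ, seg_zero]; rfl
    cases hL : res.length with
    | zero =>
      rw [hL] at hset
      simp only [innerA, List.replicate_succ, List.replicate_zero,
        List.singleton_append]
      rw [hset, hseg1]
      simp
    | succ m =>
      have hI : sL.getD m ' ' = 'I' := by
        rcases h0 with h | h
        · omega
        · rw [hL] at h; simpa using h
      rw [hL] at hset
      simp only [innerA, List.replicate_succ, List.replicate_zero, hI, if_pos,
        List.singleton_append]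
      rw [hset, hseg1]
      simp
  | succ d ih =>
    intro done cnt hmid h0
    have hset : (res ++ (List.replicate (d + 2) '0' ++ done)).set (res.length + (d + 1)) (chr48 cnt)
        = res ++ (List.replicate (d + 1) '0' ++ (chr48 cnt :: done)) := by
      rw [List.set_append_right _ _ (by omega)]
      congr 1
      have h2 : List.replicate (d + 2) '0' ++ done
          = List.replicate (d + 1) '0' ++ ('0' :: done) := by
        rw [show d + 2 = (d + 1) + 1 by omega, List.replicate_add]
        simp
      rw [h2, List.set_append_right _ _ (by simp), List.length_replicate]
      simp
    have hnI : sL.getD (res.length + d) ' ' ≠ 'I' := hmid _ (by omega) (by omega)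
    have hrec := ih (chr48 cnt :: done) (cnt + 1)
      (fun j h1 h2 => hmid j h1 (by omega)) h0
    rw [show res.length + (d + 1) = (res.length + d) + 1 by omega]
    simp only [innerA]
    rw [show (res.length + d) + 1 = res.length + (d + 1) by omega]
    rw [show d + 1 + 1 = d + 2 by omega, hset]
    simp only [hnI, if_false]
    rw [hrec, Prod.mk.injEq]
    refine ⟨?_, ?_⟩
    · rw [seg_succ cnt (d + 1)]
      simp
    · push_cast
      ring

-- stack contents after pushing 1..k and flushing everything up to position L-1 (top of stack first)
def stackOf (L k : Nat) : List Int :=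
  (List.range (k - L)).map (fun (t : Nat) => (k : Int) - (t : Int))

theorem stackOf_push (L k : Nat) (h : L ≤ k) :
    ((k : Int) + 1) :: stackOf L k = stackOf L (k + 1) := by
  unfold stackOf
  rw [show k + 1 - L = (k - L) + 1 by omega, List.range_succ_eq_map]
  simp only [List.map_cons, List.map_map]
  refine List.cons_eq_cons.mpr ⟨by simp, ?_⟩
  apply List.map_congr_left
  intro t _
  simp only [Function.comp]
  push_cast
  omega

theorem stackOf_map_chr48 (L k : Nat) (h : L ≤ k) :
    (stackOf L (k + 1)).map chr48 = seg ((L : Int) + 1) (k - L + 1) := by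
  unfold stackOf seg
  rw [show k + 1 - L = k - L + 1 by omega, List.map_map]
  apply List.map_congr_left
  intro t ht
  simp only [Function.comp]
  congr 1
  have : t < k - L + 1 := List.mem_range.mp ht
  push_cast
  omega

theorem loop_inv (sL : List Char) (n : Nat) :
    ∀ k, k ≤ n + 1 → ∃ res : List Char,
      outerA sL n k (List.replicate (n + 1) '0', 1)
          = (res ++ List.replicate (n + 1 - res.length) '0', (res.length : Int) + 1) ∧
      outerB sL n k ([], []) = (res, stackOf res.length k) ∧
      res.length ≤ k ∧
      (k ≤ n → (res.length = 0 ∨ sL.getD (res.length - 1) ' ' = 'I')) ∧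
      (∀ j, res.length ≤ j → j < k → sL.getD j ' ' ≠ 'I') ∧
      (n + 1 ≤ k → res.length = k) := by
  intro k
  induction k with
  | zero =>
    intro _
    exact ⟨[], by simp [outerA], by simp [outerB, stackOf], by simp,
      fun _ => Or.inl rfl, by intro j h1 h2; omega, fun _ => rfl⟩
  | succ k ih =>
    intro hk
    obtain ⟨res, hA, hB, hLk, h0, hmid, _⟩ := ih (by omega)
    by_cases hfl : (k = n ∨ sL.getD k ' ' = 'I')
    · -- flush at i = k
      have h0' := h0 (by omega)
      have hseg := innerA_spec sL res (k - res.length) (List.replicate (n - k) '0')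
        ((res.length : Int) + 1) (fun j h1 h2 => hmid j h1 (by omega)) h0'
      rw [show res.length + (k - res.length) = k by omega] at hseg
      have hrep : List.replicate (n + 1 - res.length) '0'
          = List.replicate (k - res.length + 1) '0' ++ List.replicate (n - k) '0' := by
        rw [← List.replicate_add]
        congr 1
        omega
      have hlen : (res ++ seg ((res.length : Int) + 1) (k - res.length + 1)).length = k + 1 := by
        simp [length_seg]; omega
      refine ⟨res ++ seg ((res.length : Int) + 1) (k - res.length + 1), ?_, ?_, by omega,
        ?_, ?_, fun _ => hlen⟩
      · simp only [outerA, hA, hfl, if_pos]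
        rw [hrep, hseg, hlen, Prod.mk.injEq]
        refine ⟨?_, ?_⟩
        · simp [List.append_assoc, show n + 1 - (k + 1) = n - k by omega]
        · omega
      · simp only [outerB, hB, hfl, if_pos]
        rw [stackOf_push res.length k hLk, popAll_eq, stackOf_map_chr48 res.length k hLk, hlen,
          Prod.mk.injEq]
        exact ⟨rfl, by simp [stackOf]⟩
      · intro hk1n
        right
        rw [hlen]
        rcases hfl with h | h
        · omega
        · simpa using h
      · intro j h1 h2
        rw [hlen] at h1
        omega
    · -- no flush at i = k (so k ≠ n and sL[k] ≠ 'I')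
      have hnI : sL.getD k ' ' ≠ 'I' := fun h => hfl (Or.inr h)
      refine ⟨res, ?_, ?_, by omega, fun _ => h0 (by omega), ?_, by omega⟩
      · simp only [outerA, hA]
        rw [if_neg hfl]
      · simp only [outerB, hB]
        rw [if_neg hfl, stackOf_push res.length k hLk]
      · intro j h1 h2
        rcases Nat.lt_succ_iff_lt_or_eq.mp h2 with h | h
        · exact hmid j h1 h
        · subst h; exact hnI

-- ===== VERDICT (by name: the statement is the Claim_ definition above) =====
theorem formMinimumNumber_spec : Claim_equal_formMinimumNumber := by
  intro str _
  unfold Spec_formMinimumNumber formMinimumNumber formMinimumNumber_alt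
  obtain ⟨res, hA, hB, _, _, _, hfull⟩ :=
    loop_inv str.toList str.toList.length (str.toList.length + 1) (Nat.le_refl _)
  have hL := hfull (Nat.le_refl _)
  simp only [hA, hB, hL]
  simp
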